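-- pv_equiv track=rewrite | github.com/AnnieChmarak/aoc | 2024/5.py | parse
-- ===== SOURCE A (Python) =====
-- Rules = dict()
--
-- Pages = list(list())
--
-- def parse(input: str, verbose: bool) -> tuple[Rules, Pages]:
--     input_part = 1
--     rules: Rules = {}
--     pages: Pages = []
--
--     lines = input.split('\n')
--     for line in lines:
--         if len(line) == 0:
--             input_part = 2
--             continue
--
--         if input_part == 1:
--             before, after = line.split('|')
--             if after not in rules:
--                 rules[after] = set()
--             rules[after].add(before)
--         else:
--             pages.append(line.split(','))
--
--     return rules, pages
-- ===== SOURCE B (Python) =====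
-- def parse(input: str, verbose: bool) -> tuple:
--     lines = input.split('\n')
--     try:
--         cut = lines.index('')
--     except ValueError:
--         cut = len(lines)
--     rules = {}
--     for line in lines[:cut]:
--         before, after = line.split('|')
--         rules.setdefault(after, set()).add(before)
--     pages = [line.split(',') for line in lines[cut + 1:] if line]
--     return rules, pages
-- ===== Notes on version B (the rewrite author's own statement) =====
-- stated objective: alternative
-- what changed: Replaces A's single pass with a stateful input_part flag by locating the first empty line, then running two independent passes: a rules fold over the lines before it and a filtered comprehension over the lines after it.
import Mathlib
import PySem

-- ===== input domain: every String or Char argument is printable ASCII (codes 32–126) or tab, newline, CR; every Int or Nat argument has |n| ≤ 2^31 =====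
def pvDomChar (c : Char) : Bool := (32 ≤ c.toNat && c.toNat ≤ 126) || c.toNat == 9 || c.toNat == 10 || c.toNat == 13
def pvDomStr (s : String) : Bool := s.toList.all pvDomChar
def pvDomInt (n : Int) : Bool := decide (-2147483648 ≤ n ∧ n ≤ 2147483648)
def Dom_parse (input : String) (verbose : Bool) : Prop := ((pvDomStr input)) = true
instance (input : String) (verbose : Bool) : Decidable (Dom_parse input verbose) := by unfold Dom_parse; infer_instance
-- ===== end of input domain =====

-- B replaces A's single stateful-flag pass with a partition at the first empty line followed by
-- two independent passes (rules block, pages block); same return value wherever A returns.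

-- s.split(sep) for a nonempty literal sep: PySem.Str.split? is none only for sep = "", so getD is exact here.
def splitStr (s : String) (sep : String) : List String := (PySem.Str.split? s sep).getD []

-- Shared micro-helper: the setdefault/add of one rule line 'before|after' (both Pythons contain it verbatim).
-- On a line that does not split into exactly two parts Python raises ValueError (excluded by Pre_);
-- the port leaves the dict unchanged there.
def addRule (rules : PySem.Dict String (PySem.Set String)) (line : String) :
    PySem.Dict String (PySem.Set String) :=
  match splitStr line "|" with
  | [before, after] => rules.insert after (PySem.Set.add (rules.getD after PySem.Set.empty) before)
  | _ => rules

-- ===== PORT A =====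
-- one step of A's loop: state = (input_part, rules, pages)
def parseStep (st : Int × PySem.Dict String (PySem.Set String) × List (List String))
    (line : String) : Int × PySem.Dict String (PySem.Set String) × List (List String) :=
  if PySem.Str.len line == 0 then (2, st.2.1, st.2.2)
  else if st.1 == 1 then (st.1, addRule st.2.1 line, st.2.2)
  else (st.1, st.2.1, st.2.2 ++ [splitStr line ","])

def parse (input : String) (verbose : Bool) : (List (String × List String)) × List (List String) :=
  let lines := splitStr input "\n"
  let st := lines.foldl parseStep (1, PySem.Dict.empty, [])
  (st.2.1.items, st.2.2)

-- ===== PORT B =====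
def parse_alt (input : String) (verbose : Bool) : (List (String × List String)) × List (List String) :=
  let lines := splitStr input "\n"
  -- try: cut = lines.index('') except ValueError: cut = len(lines)
  let cut := (PySem.List.index? lines "").getD lines.length
  let rules := (lines.take cut).foldl addRule PySem.Dict.empty   -- lines[:cut], nonneg slice = take
  let pages := ((lines.drop (cut + 1)).filter (fun l => !(l == ""))).map
      (fun l => splitStr l ",")                         -- lines[cut+1:], nonneg slice = drop
  (rules.items, pages)

-- ===== PRECONDITION & SPEC =====
-- Pre_ excludes exactly the inputs on which Python A raises ValueError: a line in the rules
-- block (before the first empty line) that does not split on '|' into exactly two pieces.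
def Pre_parse (input : String) (verbose : Bool) : Prop :=
  ∀ line ∈ (splitStr input "\n").takeWhile (fun l => !(l == "")),
    (splitStr line "|").length = 2
instance (input : String) (verbose : Bool) : Decidable (Pre_parse input verbose) := by
  unfold Pre_parse; infer_instance
def pvWitness_parse : String × Bool := ("1|2\n3|2\n\n1,2,3\n\n2,1", false)

def Spec_parse (input : String) (verbose : Bool) (out : (List (String × List String)) × List (List String)) : Prop := out = parse_alt input verbose
instance (input : String) (verbose : Bool) (out : (List (String × List String)) × List (List String)) : Decidable (Spec_parse input verbose out) := by unfold Spec_parse; infer_instance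

-- ===== CLAIM (what is proved, stated in full; the proofs are below) =====
def Claim_equal_parse : Prop := ∀ (input : String) (verbose : Bool), Dom_parse input verbose → Pre_parse input verbose → Spec_parse input verbose (parse input verbose)

-- ===== LEMMAS AND PROOFS =====

theorem strLenZero (l : String) : (PySem.Str.len l == 0) = (l == "") := by
  by_cases h : l = ""
  · subst h; decide
  · have h1 : l.toList ≠ [] := fun hc => h (String.toList_inj.mp (by simpa using hc))
    have h2 : l.toList.length ≠ 0 := by simpa [List.length_eq_zero_iff] using h1
    simp only [PySem.Str.len_eq]
    simp [h]

-- once A's flag is 2, the rest of the fold only appends the nonempty lines' comma-splits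
theorem phase2 (ls : List String) (rules : PySem.Dict String (PySem.Set String))
    (pages : List (List String)) :
    ls.foldl parseStep (2, rules, pages) =
      (2, rules, pages ++ (ls.filter (fun l => !(l == ""))).map (fun l => splitStr l ",")) := by
  induction ls generalizing pages with
  | nil => simp
  | cons h t ih =>
    by_cases hh : h = ""
    · subst hh
      simp [parseStep, ih]
    · have hl : (PySem.Str.len h == 0) = false := by
        rw [strLenZero]; exact beq_false_of_ne hh
      simp [parseStep, ih, hh]

-- the main invariant: A's fold from part 1 equals B's partitioned computation
theorem mainInv (ls : List String) (rules : PySem.Dict String (PySem.Set String))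
    (hpre : ∀ line ∈ ls.takeWhile (fun l => !(l == "")), (splitStr line "|").length = 2) :
    (ls.foldl parseStep (1, rules, [])).2 =
      (((ls.take ((PySem.List.index? ls "").getD ls.length)).foldl addRule rules),
       ((ls.drop ((PySem.List.index? ls "").getD ls.length + 1)).filter (fun l => !(l == ""))).map
          (fun l => splitStr l ",")) := by
  induction ls generalizing rules with
  | nil => simp [PySem.List.index?]
  | cons h t ih =>
    by_cases hh : h = ""
    · subst hh
      rw [PySem.List.index?_cons_self]
      simp only [Option.getD_some, List.take_zero, List.foldl_nil, List.drop_succ_cons,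
        List.drop_zero, List.foldl_cons]
      have : parseStep (1, rules, []) "" = (2, rules, []) := by simp [parseStep]
      rw [this, phase2]
      simp
    · have hl : (PySem.Str.len h == 0) = false := by
        rw [strLenZero]; exact beq_false_of_ne hh
      have hstep : parseStep (1, rules, []) h = (1, addRule rules h, []) := by
        simp [parseStep, hh]
      rw [List.foldl_cons, hstep]
      rw [PySem.List.index?_cons_of_ne _ hh]
      have hpre' : ∀ line ∈ t.takeWhile (fun l => !(l == "")), (splitStr line "|").length = 2 := by
        intro line hline
        exact hpre line (by simp [hh]; exact Or.inr hline)
      rw [ih (addRule rules h) hpre']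
      cases hidx : PySem.List.index? t "" with
      | none => simp
      | some k => simp

-- ===== VERDICT (by name: the statement is the Claim_ definition above) =====
theorem parse_spec : Claim_equal_parse := by
  intro input verbose _ hpre
  unfold Spec_parse
  simp only [parse, parse_alt]
  rw [mainInv (splitStr input "\n") PySem.Dict.empty hpre]
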